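-- pv_equiv track=rewrite | github.com/lochan-m05/Job_Analysis | job_analyzer.py | categorize_skills
-- ===== SOURCE A (Python) =====
-- def categorize_skills(skills_data):
--     """Categorize skills by type"""
--     categories = {
--         'programming': [],
--         'databases': [],
--         'cloud': [],
--         'analytics': [],
--         'soft_skills': skills_data.get('soft_skills', [])
--     }
--
--     tech_skills = skills_data.get('technical_skills', [])
--
--     for skill in tech_skills:
--         if skill in ['python', 'java', 'javascript', 'html', 'css', 'react', 'angular', 'vue', 'node.js']:
--             categories['programming'].append(skill)
--         elif skill in ['sql', 'mongodb', 'postgresql', 'mysql']: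
--             categories['databases'].append(skill)
--         elif skill in ['aws', 'azure', 'gcp', 'docker', 'kubernetes']:
--             categories['cloud'].append(skill)
--         elif skill in ['tableau', 'power bi', 'excel', 'r', 'machine learning', 'data science']:
--             categories['analytics'].append(skill)
--
--     return categories
-- ===== SOURCE B (Python) =====
-- GROUPS = {
--     'programming': ('python', 'java', 'javascript', 'html', 'css', 'react', 'angular', 'vue', 'node.js'),
--     'databases': ('sql', 'mongodb', 'postgresql', 'mysql'),
--     'cloud': ('aws', 'azure', 'gcp', 'docker', 'kubernetes'),
--     'analytics': ('tableau', 'power bi', 'excel', 'r', 'machine learning', 'data science'),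
-- }
--
--
-- def categorize_skills(skills_data):
--     """Categorize skills by type"""
--     tech_skills = skills_data.get('technical_skills', [])
--     result = {name: [s for s in tech_skills if s in members]
--               for name, members in GROUPS.items()}
--     result['soft_skills'] = skills_data.get('soft_skills', [])
--     return result
-- ===== Notes on version B (the rewrite author's own statement) =====
-- stated objective: idiomatic
-- what changed: Replaces the single pass with a mutated dict and an if/elif membership chain by a table of skill groups and one order-preserving filter comprehension per category (the groups are disjoint, so the elif priority is irrelevant).
import Mathlib
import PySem

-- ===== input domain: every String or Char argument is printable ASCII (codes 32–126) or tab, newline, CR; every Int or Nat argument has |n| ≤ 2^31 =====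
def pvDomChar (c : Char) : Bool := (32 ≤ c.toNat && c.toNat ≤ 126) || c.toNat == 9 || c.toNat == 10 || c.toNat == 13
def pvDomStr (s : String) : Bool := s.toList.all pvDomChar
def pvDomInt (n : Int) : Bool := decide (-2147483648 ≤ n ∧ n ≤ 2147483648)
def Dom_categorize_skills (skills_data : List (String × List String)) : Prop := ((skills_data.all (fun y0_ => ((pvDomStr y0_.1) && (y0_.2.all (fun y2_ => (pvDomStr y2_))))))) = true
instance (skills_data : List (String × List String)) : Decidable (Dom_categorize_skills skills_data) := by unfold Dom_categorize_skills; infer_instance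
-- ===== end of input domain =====

-- B replaces A's if/elif dispatch loop by a group table and one filter per category (idiomatic, same cost).


-- shared literal data: the four skill groups
def progL : List String := ["python", "java", "javascript", "html", "css", "react", "angular", "vue", "node.js"]
def dbL : List String := ["sql", "mongodb", "postgresql", "mysql"]
def cloudL : List String := ["aws", "azure", "gcp", "docker", "kubernetes"]
def anaL : List String := ["tableau", "power bi", "excel", "r", "machine learning", "data science"]

-- ===== PORT A =====
-- A's loop body: the categories dict has fixed keys, modelled as a 4-tuple of the mutable lists
def catStepA (st : List String × List String × List String × List String) (skill : String) :
    List String × List String × List String × List String :=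
  if progL.contains skill then (st.1 ++ [skill], st.2.1, st.2.2.1, st.2.2.2)
  else if dbL.contains skill then (st.1, st.2.1 ++ [skill], st.2.2.1, st.2.2.2)
  else if cloudL.contains skill then (st.1, st.2.1, st.2.2.1 ++ [skill], st.2.2.2)
  else if anaL.contains skill then (st.1, st.2.1, st.2.2.1, st.2.2.2 ++ [skill])
  else st

def categorize_skills (skills_data : List (String × List String)) : List (String × List String) :=
  let soft := PySem.Dict.getD ⟨skills_data⟩ "soft_skills" []
  let tech := PySem.Dict.getD ⟨skills_data⟩ "technical_skills" []
  let st := tech.foldl catStepA ([], [], [], [])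
  [("programming", st.1), ("databases", st.2.1), ("cloud", st.2.2.1),
   ("analytics", st.2.2.2), ("soft_skills", soft)]

-- ===== PORT B =====
def categorize_skills_alt (skills_data : List (String × List String)) : List (String × List String) :=
  let tech := PySem.Dict.getD ⟨skills_data⟩ "technical_skills" []
  [("programming", tech.filter (progL.contains ·)),
   ("databases", tech.filter (dbL.contains ·)),
   ("cloud", tech.filter (cloudL.contains ·)),
   ("analytics", tech.filter (anaL.contains ·)),
   ("soft_skills", PySem.Dict.getD ⟨skills_data⟩ "soft_skills" [])]

-- ===== PRECONDITION & SPEC =====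
def Spec_categorize_skills (skills_data : List (String × List String)) (out : List (String × List String)) : Prop := out = categorize_skills_alt skills_data
instance (skills_data : List (String × List String)) (out : List (String × List String)) : Decidable (Spec_categorize_skills skills_data out) := by unfold Spec_categorize_skills; infer_instance

-- ===== CLAIM (what is proved, stated in full; the proofs are below) =====
def Claim_equal_categorize_skills : Prop := ∀ (skills_data : List (String × List String)), Dom_categorize_skills skills_data → Spec_categorize_skills skills_data (categorize_skills skills_data)

-- ===== LEMMAS AND PROOFS =====

-- the four skill groups are pairwise disjoint
theorem disj_prog_db (s : String) (h : s ∈ progL) : s ∉ dbL := by fin_cases h <;> decide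

theorem disj_prog_cloud (s : String) (h : s ∈ progL) : s ∉ cloudL := by fin_cases h <;> decide

theorem disj_prog_ana (s : String) (h : s ∈ progL) : s ∉ anaL := by fin_cases h <;> decide

theorem disj_db_cloud (s : String) (h : s ∈ dbL) : s ∉ cloudL := by fin_cases h <;> decide

theorem disj_db_ana (s : String) (h : s ∈ dbL) : s ∉ anaL := by fin_cases h <;> decide

theorem disj_cloud_ana (s : String) (h : s ∈ cloudL) : s ∉ anaL := by fin_cases h <;> decide

-- loop invariant: A's fold is the four independent filters
theorem foldl_catStepA (tech p d c a : List String) :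
    tech.foldl catStepA (p, d, c, a) =
      (p ++ tech.filter (progL.contains ·), d ++ tech.filter (dbL.contains ·),
       c ++ tech.filter (cloudL.contains ·), a ++ tech.filter (anaL.contains ·)) := by
  induction tech generalizing p d c a with
  | nil => simp
  | cons s rest ih =>
    simp only [List.foldl_cons, List.filter_cons, catStepA]
    by_cases hp : s ∈ progL
    · simp [hp, disj_prog_db s hp, disj_prog_cloud s hp, disj_prog_ana s hp, ih]
    · by_cases hd : s ∈ dbL
      · simp [hp, hd, disj_db_cloud s hd, disj_db_ana s hd, ih]
      · by_cases hc : s ∈ cloudL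
        · simp [hp, hd, hc, disj_cloud_ana s hc, ih]
        · by_cases ha : s ∈ anaL
          · simp [hp, hd, hc, ha, ih]
          · simp [hp, hd, hc, ha, ih]

-- ===== VERDICT (by name: the statement is the Claim_ definition above) =====
theorem categorize_skills_spec : Claim_equal_categorize_skills := by
  intro skills_data _
  unfold Spec_categorize_skills categorize_skills categorize_skills_alt
  simp [foldl_catStepA]
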